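-- pv_equiv track=rewrite | github.com/manoj2601/COL764-Information-Retrieval-And-Web-Search | Assignment 1/2018CS50411/helper.py | changeBinaryc4
-- ===== SOURCE A (Python) =====
-- def encodec4(num):
-- 	k = 6
-- 	b = pow(2, k)
-- 	q = (num-1)//b
-- 	r = num-q*b-1
-- 	cr = "{0:b}".format(r)
-- 	while(len(cr) < 6):
-- 		cr = "0"+cr
-- 	ret = ""
-- 	for i in range(0, q):
-- 		ret += '1'
-- 	ret += '0'
-- 	ret += cr
-- 	return ret
--
-- def changeBinaryc4(val):
-- 	newlist = []
-- 	newlist.append(1+val[0])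
-- 	for i in range(0, len(val)-1):
-- 		newlist.append(val[i+1]-val[i])
-- 	ret = []
-- 	prev = ""
-- 	for i in range(0, len(newlist)):
-- 		num = newlist[i]
--
-- 		rett = prev
-- 		rett += encodec4(num)
-- 		j=0
-- 		while(j+8 < len(rett)):
-- 			ret.append(rett[j:j+8])
-- 			j = j+8
-- 		prev = rett[j:]
-- 	if(len(prev) != 0):
-- 		for i in range(0, 8-len(prev)):
-- 			prev += '1'
-- 		ret.append(prev)
-- 	return ret
-- ===== SOURCE B (Python) =====
-- def encodec4(num):
--     q = (num - 1) // 64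
--     r = (num - 1) % 64
--     return '1' * q + '0' + format(r, '06b')
--
-- def changeBinaryc4(val):
--     gaps = [1 + val[0]] + [b - a for a, b in zip(val, val[1:])]
--     bits = ''.join(encodec4(n) for n in gaps)
--     ret = [bits[i:i + 8] for i in range(0, len(bits), 8)]
--     if len(ret[-1]) < 8:
--         ret[-1] = ret[-1] + '1' * (8 - len(ret[-1]))
--     return ret
-- ===== Notes on version B (the rewrite author's own statement) =====
-- stated objective: simpler
-- what changed: Instead of carrying a running 'prev' buffer through an incremental emit-bytes-as-you-encode loop, B concatenates all unary+remainder codes into one bit string and splits it into 8-char chunks in one comprehension, padding only a short final chunk with '1's.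
import Mathlib
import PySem

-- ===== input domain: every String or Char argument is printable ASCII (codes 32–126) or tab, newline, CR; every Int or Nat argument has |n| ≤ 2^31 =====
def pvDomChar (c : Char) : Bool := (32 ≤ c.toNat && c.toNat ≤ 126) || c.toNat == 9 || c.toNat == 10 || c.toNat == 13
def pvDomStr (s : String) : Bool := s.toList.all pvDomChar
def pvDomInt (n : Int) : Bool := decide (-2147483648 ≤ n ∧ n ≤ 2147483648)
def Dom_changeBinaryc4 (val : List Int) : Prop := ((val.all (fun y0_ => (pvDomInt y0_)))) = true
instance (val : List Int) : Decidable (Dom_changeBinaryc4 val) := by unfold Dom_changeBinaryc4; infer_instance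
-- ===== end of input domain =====

-- B drops A's carried 'prev' buffer: it joins all codes into one bit string, chunks it by 8
-- and pads only a short final chunk; equal output proved on every non-empty list (A raises on []).

-- ===== PORT A =====

-- "{0:b}".format(r) for r ≥ 0 (exact there; the only use site has r ≥ 0): binary digits of a Nat
def pvBinDigits (n : Nat) : List Char :=
  if n = 0 then [] else pvBinDigits (n / 2) ++ [if n % 2 = 1 then '1' else '0']

def pvBin (n : Nat) : List Char := if n = 0 then ['0'] else pvBinDigits n

-- while(len(cr) < 6): cr = "0" + cr
def pvPadLoop (cr : List Char) : List Char :=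
  if cr.length < 6 then pvPadLoop ('0' :: cr) else cr
  termination_by 6 - cr.length

def pvEncA (num : Int) : List Char :=
  let q := PySem.Int.floordiv (num - 1) 64
  let r := num - q * 64 - 1
  let cr := pvPadLoop (pvBin r.toNat)   -- r ≥ 0 always (r = (num-1) mod 64)
  -- for i in range(0, q): ret += '1'   (q ≤ 0 gives the empty range)
  List.replicate q.toNat '1' ++ ['0'] ++ cr

-- inner while(j+8 < len(rett)): ret.append(rett[j:j+8]); j += 8; then prev = rett[j:]
def pvEmitA (rett : List Char) (ret : List (List Char)) : List (List Char) × List Char :=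
  if 8 < rett.length then pvEmitA (rett.drop 8) (ret ++ [rett.take 8]) else (ret, rett)
  termination_by rett.length

-- outer for over newlist carrying (ret, prev)
def pvLoopA : List Int → List (List Char) → List Char → List (List Char) × List Char
  | [], ret, prev => (ret, prev)
  | n :: ns, ret, prev =>
      let p := pvEmitA (prev ++ pvEncA n) ret
      pvLoopA ns p.1 p.2

def changeBinaryc4 (val : List Int) : List String :=
  match val with
  | [] => []   -- Python raises IndexError on val[0]; excluded by Pre_
  | v0 :: _ =>
    -- newlist = [1+val[0]] then for i in range(0,len(val)-1): append(val[i+1]-val[i]); indices in range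
    let newlist : List Int :=
      (1 + v0) :: (List.range (val.length - 1)).map (fun i => val.getD (i + 1) 0 - val.getD i 0)
    let p := pvLoopA newlist [] []
    let out := if p.2.length ≠ 0 then p.1 ++ [p.2 ++ List.replicate (8 - p.2.length) '1'] else p.1
    out.map String.ofList

-- ===== PORT B =====

-- '1' * q + '0' + format(r, '06b')
def pvEncB (num : Int) : List Char :=
  let q := PySem.Int.floordiv (num - 1) 64
  let r := PySem.Int.mod (num - 1) 64
  let s := pvBin r.toNat
  List.replicate q.toNat '1' ++ ['0'] ++ (List.replicate (6 - s.length) '0' ++ s)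

-- [bits[i:i+8] for i in range(0, len(bits), 8)]
def pvChunks8 (bits : List Char) : List (List Char) :=
  if bits = [] then [] else bits.take 8 :: pvChunks8 (bits.drop 8)
  termination_by bits.length
  decreasing_by simp [List.length_pos_iff]; simp_all

-- ret[-1] = ret[-1] + '1' * (8 - len(ret[-1])) when short
def pvPadLast : List (List Char) → List (List Char)
  | [] => []
  | [c] => [if c.length < 8 then c ++ List.replicate (8 - c.length) '1' else c]
  | c :: cs => c :: pvPadLast cs

def changeBinaryc4_alt (val : List Int) : List String :=
  match val with
  | [] => []   -- Python raises IndexError on val[0]; excluded by Pre_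
  | v0 :: rest =>
    let gaps : List Int := (1 + v0) :: List.zipWith (fun a b => b - a) val rest
    let bits := (gaps.map pvEncB).flatten
    (pvPadLast (pvChunks8 bits)).map String.ofList

-- ===== PRECONDITION & SPEC =====
-- Python A raises IndexError (val[0]) on the empty list; B raises there too.
def Pre_changeBinaryc4 (val : List Int) : Prop := val ≠ []
instance (val : List Int) : Decidable (Pre_changeBinaryc4 val) := by unfold Pre_changeBinaryc4; infer_instance
def pvWitness_changeBinaryc4 : List Int := ([3, 7, 70])

def Spec_changeBinaryc4 (val : List Int) (out : List String) : Prop := out = changeBinaryc4_alt val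
instance (val : List Int) (out : List String) : Decidable (Spec_changeBinaryc4 val out) := by unfold Spec_changeBinaryc4; infer_instance

-- ===== CLAIM (what is proved, stated in full; the proofs are below) =====
def Claim_equal_changeBinaryc4 : Prop := ∀ (val : List Int), Dom_changeBinaryc4 val → Pre_changeBinaryc4 val → Spec_changeBinaryc4 val (changeBinaryc4 val)

-- ===== LEMMAS AND PROOFS =====

-- the two encoders agree
theorem pvPadLoop_eq (cr : List Char) : pvPadLoop cr = List.replicate (6 - cr.length) '0' ++ cr := by
  fun_induction pvPadLoop cr with
  | case1 cr h ih =>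
      rw [ih]
      have : 6 - cr.length = (6 - (('0' :: cr).length)) + 1 := by simp; omega
      rw [this, List.replicate_succ']
      simp
  | case2 cr h =>
      have : 6 - cr.length = 0 := by omega
      simp [this]

theorem pvEnc_eq (num : Int) : pvEncA num = pvEncB num := by
  have h := PySem.Int.floordiv_mul_add_mod (num - 1) 64
  have hr : num - PySem.Int.floordiv (num - 1) 64 * 64 - 1 = PySem.Int.mod (num - 1) 64 := by omega
  simp only [pvEncA, pvEncB]
  rw [hr, pvPadLoop_eq]

-- the gap lists agree
theorem pv_gaps_eq (l : List Int) :
    (List.range (l.length - 1)).map (fun i => l.getD (i + 1) 0 - l.getD i 0)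
      = List.zipWith (fun a b => b - a) l l.tail := by
  induction l with
  | nil => simp
  | cons a t ih =>
      cases t with
      | nil => simp
      | cons b t' =>
        simp only [List.length_cons, Nat.add_sub_cancel, List.range_succ_eq_map,
          List.map_cons, List.map_map, List.tail_cons, List.zipWith_cons_cons] at ih ⊢
        congr 1

-- pvEmitA facts
theorem pvEmitA_accum (s : List Char) (ret : List (List Char)) :
    pvEmitA s ret = (ret ++ (pvEmitA s []).1, (pvEmitA s []).2) := by
  by_cases h : 8 < s.length
  · rw [pvEmitA, if_pos h]
    conv_rhs => rw [pvEmitA, if_pos h]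
    rw [pvEmitA_accum (s.drop 8) (ret ++ [s.take 8]),
        pvEmitA_accum (s.drop 8) ([] ++ [s.take 8])]
    simp
  · rw [pvEmitA, if_neg h]
    conv_rhs => rw [pvEmitA, if_neg h]
    simp
  termination_by s.length
  decreasing_by all_goals (simp; omega)

theorem pvEmitA_rem_le (s : List Char) (ret : List (List Char)) : (pvEmitA s ret).2.length ≤ 8 := by
  fun_induction pvEmitA s ret with
  | case1 s ret h ih => exact ih
  | case2 s ret h => simpa using by omega

theorem pvEmitA_small (s : List Char) (ret : List (List Char)) (h : s.length ≤ 8) :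
    pvEmitA s ret = (ret, s) := by
  rw [pvEmitA]; simp [Nat.not_lt_of_le h]

-- chunking commutes with concatenation
theorem pvEmitA_append (s t : List Char) (ret : List (List Char)) :
    pvEmitA (s ++ t) ret = pvEmitA ((pvEmitA s ret).2 ++ t) (pvEmitA s ret).1 := by
  fun_induction pvEmitA s ret with
  | case1 s ret h ih =>
      have h8 : 8 < (s ++ t).length := by simp; omega
      rw [pvEmitA, if_pos h8]
      have ht : (s ++ t).take 8 = s.take 8 := List.take_append_of_le_length (by omega)
      have hd : (s ++ t).drop 8 = s.drop 8 ++ t := List.drop_append_of_le_length (by omega)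
      rw [ht, hd, ih]
  | case2 s ret h => rfl

-- A's outer loop is the chunking of the concatenation
theorem pvLoopA_spec (ns : List Int) (ret : List (List Char)) (prev : List Char)
    (hp : prev.length ≤ 8) :
    pvLoopA ns ret prev = pvEmitA (prev ++ (ns.map pvEncA).flatten) ret := by
  induction ns generalizing ret prev with
  | nil => simp [pvLoopA, pvEmitA_small _ _ hp]
  | cons n ns ih =>
      simp only [pvLoopA, List.map_cons, List.flatten_cons]
      rw [ih _ _ (pvEmitA_rem_le _ _), ← pvEmitA_append, List.append_assoc]

-- pvChunks8 never produces an empty chunk, and a nonempty input gives a nonempty chunk list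
theorem pvChunks8_ne (bits : List Char) (h : bits ≠ []) : pvChunks8 bits ≠ [] := by
  rw [pvChunks8]; simp [h]

-- A's chunk-then-pad equals B's chunk list with its last element padded
theorem pvEmit_pad_eq (s : List Char) (hs : s ≠ []) :
    (if (pvEmitA s []).2.length ≠ 0
      then (pvEmitA s []).1 ++ [(pvEmitA s []).2 ++ List.replicate (8 - (pvEmitA s []).2.length) '1']
      else (pvEmitA s []).1)
      = pvPadLast (pvChunks8 s) := by
  by_cases h8 : s.length ≤ 8
  · rw [pvEmitA_small _ _ h8]
    have hlen : s.length ≠ 0 := by simpa using hs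
    rw [pvChunks8]
    simp only [if_neg hs]
    rw [List.take_of_length_le h8, List.drop_eq_nil_of_le h8, pvChunks8]
    simp only [pvPadLast, hlen, if_pos, ne_eq, not_false_iff]
    by_cases h7 : s.length < 8
    · simp [h7]
    · have : 8 - s.length = 0 := by omega
      simp [h7, this]
  · push Not at h8
    have hdrop : (s.drop 8) ≠ [] := by
      have : (s.drop 8).length = s.length - 8 := by simp
      intro hc; rw [hc] at this; simp at this; omega
    rw [pvEmitA, if_pos h8, pvEmitA_accum]
    have ih := pvEmit_pad_eq (s.drop 8) hdrop
    rw [pvChunks8, if_neg hs]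
    have hch := pvChunks8_ne (s.drop 8) hdrop
    have hpad : pvPadLast (s.take 8 :: pvChunks8 (s.drop 8))
        = s.take 8 :: pvPadLast (pvChunks8 (s.drop 8)) := by
      cases hc : pvChunks8 (s.drop 8) with
      | nil => exact absurd hc hch
      | cons c cs => rfl
    rw [hpad, ← ih]
    by_cases hz : (pvEmitA (s.drop 8) []).2.length ≠ 0 <;> simp [hz]
  termination_by s.length
  decreasing_by simp; omega

-- encoded strings are nonempty (they contain the '0' separator)
theorem pvEncA_ne (n : Int) : pvEncA n ≠ [] := by
  unfold pvEncA; simp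

-- ===== VERDICT (by name: the statement is the Claim_ definition above) =====
theorem changeBinaryc4_spec : Claim_equal_changeBinaryc4 := by
  intro val _hdom hpre
  unfold Spec_changeBinaryc4
  match val, hpre with
  | v0 :: rest, _ =>
    unfold changeBinaryc4 changeBinaryc4_alt
    simp only
    rw [pvLoopA_spec _ _ _ (by simp), List.nil_append]
    have hg : (List.range ((v0 :: rest).length - 1)).map
        (fun i => (v0 :: rest).getD (i + 1) 0 - (v0 :: rest).getD i 0)
        = List.zipWith (fun a b => b - a) (v0 :: rest) rest := by
      have := pv_gaps_eq (v0 :: rest); simpa using this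
    rw [hg]
    have henc : ((1 + v0) :: List.zipWith (fun a b => b - a) (v0 :: rest) rest).map pvEncA
        = ((1 + v0) :: List.zipWith (fun a b => b - a) (v0 :: rest) rest).map pvEncB := by
      apply List.map_congr_left; intro n _; exact pvEnc_eq n
    rw [henc]
    set bits := (((1 + v0) :: List.zipWith (fun a b => b - a) (v0 :: rest) rest).map pvEncB).flatten with hbits
    have hne : bits ≠ [] := by
      rw [hbits]
      simp only [List.map_cons, List.flatten_cons, ne_eq, List.append_eq_nil_iff, not_and]
      intro hc
      have := pvEncA_ne (1 + v0)
      rw [pvEnc_eq] at this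
      exact absurd hc this
    rw [pvEmit_pad_eq bits hne]
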